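-- pv_equiv track=rewrite | github.com/EasyElectrons/cipher-tools | encode.py | direct_numeric
-- ===== SOURCE A (Python) =====
-- def direct_numeric(pt):
-- 	ct = ''
--
-- 	for i in range(len(pt)):
-- 		if ord('a') <= ord(pt[i]) and ord(pt[i]) <= ord('z'):
-- 			ct += str(ord(pt[i]) - ord('a') + 1) + '-'*(1-int(i == len(pt)-1 or not pt[i+1].isalpha()))
-- 		else:
-- 			ct += pt[i]
--
-- 	return ct
-- ===== SOURCE B (Python) =====
-- def direct_numeric(pt):
--     # Run-based re-implementation: split pt into maximal alphabetic runs;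
--     # inside a run the dash follows a lowercase letter except at the run's end.
--     pieces = []
--     i = 0
--     n = len(pt)
--     while i < n:
--         if pt[i].isalpha():
--             j = i
--             while j < n and pt[j].isalpha():
--                 j += 1
--             run = pt[i:j]
--             m = len(run)
--             for k in range(m):
--                 c = run[k]
--                 if 'a' <= c <= 'z':
--                     pieces.append(str(ord(c) - ord('a') + 1))
--                     if k < m - 1:
--                         pieces.append('-')
--                 else:
--                     pieces.append(c)
--             i = j
--         else:
--             pieces.append(pt[i])
--             i += 1
--     return ''.join(pieces)
-- ===== Notes on version B (the rewrite author's own statement) =====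
-- stated objective: alternative
-- what changed: Replaced A's single indexed loop with a per-character lookahead (pt[i+1].isalpha()) by a run-based traversal that splits the string into maximal alphabetic runs and suppresses the dash only at the end of each run, accumulating pieces in a list joined once.
import Mathlib
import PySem

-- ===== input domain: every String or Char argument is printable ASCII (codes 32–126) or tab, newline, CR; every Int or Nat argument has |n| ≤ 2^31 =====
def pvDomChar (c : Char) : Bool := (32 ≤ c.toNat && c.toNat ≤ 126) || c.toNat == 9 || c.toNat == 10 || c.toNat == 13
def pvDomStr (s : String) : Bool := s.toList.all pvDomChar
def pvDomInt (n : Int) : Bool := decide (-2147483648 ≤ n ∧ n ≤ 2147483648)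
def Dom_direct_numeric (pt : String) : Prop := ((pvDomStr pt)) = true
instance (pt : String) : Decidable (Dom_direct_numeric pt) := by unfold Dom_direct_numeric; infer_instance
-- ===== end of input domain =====

-- B replaces A's per-index lookahead loop by a run-based traversal (maximal alphabetic
-- runs, dash suppressed at run ends); objective: alternative decomposition, same cost.

-- ===== PORT A =====
-- literal port of A: for i in range(len(pt)); lowercase → str(ord-96) + '-'*(1-int(i last or pt[i+1] not alpha))
def direct_numeric (pt : String) : String :=
  let s := pt.toList
  let ct := (PySem.List.pyRange 0 (s.length : Int) 1).foldl (fun ct i =>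
    if 97 ≤ (PySem.List.pyGetD s i ' ').toNat ∧ (PySem.List.pyGetD s i ' ').toNat ≤ 122 then
      ct ++ PySem.Int.toChars (((PySem.List.pyGetD s i ' ').toNat : Int) - 97 + 1) ++
        PySem.List.pyRepeat ['-']
          (1 - (if i == (s.length : Int) - 1
                   || !(PySem.Chars.isalpha (PySem.List.pyGetD s (i + 1) ' '))
                then 1 else 0))
    else ct ++ [PySem.List.pyGetD s i ' ']) ([] : List Char)
  String.ofList ct

-- ===== PORT B =====
-- the inner 'for k in range(m)' over one alphabetic run (rest ≠ [] ↔ k < m-1)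
def pvRunEmit : List Char → List Char
  | [] => []
  | c :: rest =>
    (if 'a' ≤ c ∧ c ≤ 'z' then
       PySem.Int.toChars ((c.toNat : Int) - 97 + 1) ++ (if rest.isEmpty then [] else ['-'])
     else [c]) ++ pvRunEmit rest

-- the outer while loop: peel one maximal alphabetic run, or one non-alpha char
def pvBLoop : List Char → List Char
  | [] => []
  | c :: rest =>
    if PySem.Chars.isalpha c then
      pvRunEmit ((c :: rest).takeWhile PySem.Chars.isalpha)
        ++ pvBLoop ((c :: rest).dropWhile PySem.Chars.isalpha)
    else c :: pvBLoop rest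
termination_by l => l.length
decreasing_by
  · simp_all
    exact List.length_dropWhile_le _ _
  · simp

def direct_numeric_alt (pt : String) : String := String.ofList (pvBLoop pt.toList)

-- ===== PRECONDITION & SPEC =====
def Spec_direct_numeric (pt : String) (out : String) : Prop := out = direct_numeric_alt pt
instance (pt : String) (out : String) : Decidable (Spec_direct_numeric pt out) := by unfold Spec_direct_numeric; infer_instance

-- ===== CLAIM (what is proved, stated in full; the proofs are below) =====
def Claim_equal_direct_numeric : Prop := ∀ (pt : String), Dom_direct_numeric pt → Spec_direct_numeric pt (direct_numeric pt)

-- ===== LEMMAS AND PROOFS =====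

-- does the next character exist and is alphabetic?
def pvNextAlpha : List Char → Bool
  | [] => false
  | d :: _ => PySem.Chars.isalpha d

-- common characterisation: one piece per character, dash decided by lookahead
def pvSpecFn : List Char → List Char
  | [] => []
  | c :: rest =>
    (if 'a' ≤ c ∧ c ≤ 'z' then
       PySem.Int.toChars ((c.toNat : Int) - 97 + 1) ++ (if pvNextAlpha rest then ['-'] else [])
     else [c]) ++ pvSpecFn rest

theorem pv_lc_iff (c : Char) : (97 ≤ c.toNat ∧ c.toNat ≤ 122) ↔ ('a' ≤ c ∧ c ≤ 'z') := by
  constructor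
  · rintro ⟨h1, h2⟩
    exact ⟨Char.le_def.mpr (UInt32.le_iff_toNat_le.mpr h1),
           Char.le_def.mpr (UInt32.le_iff_toNat_le.mpr h2)⟩
  · rintro ⟨h1, h2⟩
    exact ⟨UInt32.le_iff_toNat_le.mp (Char.le_def.mp h1),
           UInt32.le_iff_toNat_le.mp (Char.le_def.mp h2)⟩

theorem pv_islower_imp (c : Char) : ('a' ≤ c ∧ c ≤ 'z') → PySem.Chars.isalpha c = true := by
  intro h
  simp [PySem.Chars.isalpha, PySem.Chars.islower, h.1, h.2]

theorem pvA_loop (s : List Char) (a : Nat) (acc : List Char) :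
    (PySem.List.pyRange (a : Int) (s.length : Int) 1).foldl (fun ct i =>
      if 97 ≤ (PySem.List.pyGetD s i ' ').toNat ∧ (PySem.List.pyGetD s i ' ').toNat ≤ 122 then
        ct ++ PySem.Int.toChars (((PySem.List.pyGetD s i ' ').toNat : Int) - 97 + 1) ++
          PySem.List.pyRepeat ['-']
            (1 - (if i == (s.length : Int) - 1
                     || !(PySem.Chars.isalpha (PySem.List.pyGetD s (i + 1) ' '))
                  then 1 else 0))
      else ct ++ [PySem.List.pyGetD s i ' ']) acc = acc ++ pvSpecFn (s.drop a) := by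
  rcases Nat.lt_or_ge a s.length with hlt | hge
  · have hdrop : s.drop a = s[a] :: s.drop (a + 1) := List.drop_eq_getElem_cons hlt
    have hget : PySem.List.pyGetD s (a : Int) ' ' = s[a] := by
      rw [PySem.List.pyGetD_natCast]; exact List.getD_eq_getElem s ' ' hlt
    have hcast : (a : Int) + 1 = ((a + 1 : Nat) : Int) := by push_cast; ring
    have hget1 : PySem.List.pyGetD s ((a + 1 : Nat) : Int) ' ' = (s.drop (a + 1)).headD ' ' := by
      rw [PySem.List.pyGetD_natCast]
      rcases Nat.lt_or_ge (a + 1) s.length with h1 | h1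
      · rw [List.getD_eq_getElem s ' ' h1, List.drop_eq_getElem_cons h1]; rfl
      · rw [List.getD_eq_default s ' ' h1, List.drop_eq_nil_of_le h1]; rfl
    have hpiece : PySem.List.pyRepeat ['-']
        (1 - (if ((a : Int) == (s.length : Int) - 1
                  || !(PySem.Chars.isalpha ((s.drop (a + 1)).headD ' '))) then 1 else 0))
        = (if pvNextAlpha (s.drop (a + 1)) then ['-'] else []) := by
      rcases Nat.lt_or_ge (a + 1) s.length with h1 | h1
      · have hne : ((a : Int) == (s.length : Int) - 1) = false := by
          simp only [beq_eq_false_iff_ne, ne_eq]; omega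
        rw [List.drop_eq_getElem_cons h1]
        simp only [hne, Bool.false_or, pvNextAlpha, List.headD_cons]
        rcases Bool.eq_false_or_eq_true (PySem.Chars.isalpha s[a + 1]) with h2 | h2 <;>
          simp only [h2] <;> decide
      · have heq : ((a : Int) == (s.length : Int) - 1) = true := by
          simp only [beq_iff_eq]; omega
        rw [List.drop_eq_nil_of_le h1]
        simp only [heq, Bool.true_or, pvNextAlpha]
        decide
    rw [PySem.List.pyRange_one_cons (by exact_mod_cast hlt)]
    simp only [List.foldl_cons, hget, hcast, hget1, hpiece]
    rw [pvA_loop s (a + 1)]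
    rw [hdrop]
    simp only [pvSpecFn]
    by_cases hc : 97 ≤ s[a].toNat ∧ s[a].toNat ≤ 122
    · rw [if_pos hc, if_pos ((pv_lc_iff s[a]).mp hc)]
      simp [List.append_assoc]
    · rw [if_neg hc, if_neg (fun h => hc ((pv_lc_iff s[a]).mpr h))]
      simp
  · rw [PySem.List.pyRange_one_eq_nil (by exact_mod_cast hge), List.drop_eq_nil_of_le hge]
    simp [pvSpecFn]
termination_by s.length - a

theorem pvRun_emit (run rest : List Char) (hall : ∀ x ∈ run, PySem.Chars.isalpha x = true)
    (hrest : pvNextAlpha rest = false) :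
    pvRunEmit run ++ pvSpecFn rest = pvSpecFn (run ++ rest) := by
  induction run with
  | nil => simp [pvRunEmit]
  | cons c rs ih =>
    have ih' := ih (fun x hx => hall x (List.mem_cons_of_mem c hx))
    have hna : pvNextAlpha (rs ++ rest) = (if rs.isEmpty then false else true) := by
      cases rs with
      | nil => simpa [pvNextAlpha] using hrest
      | cons d ds => simp [pvNextAlpha, hall d (by simp)]
    simp only [pvRunEmit, List.cons_append, pvSpecFn, hna, List.append_assoc, ih']
    by_cases hc : 'a' ≤ c ∧ c ≤ 'z'
    · cases hrs : rs.isEmpty <;> simp [hc]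
    · simp [hc]

theorem pvB_eq_spec (l : List Char) : pvBLoop l = pvSpecFn l := by
  rcases l with _ | ⟨c, rest⟩
  · rw [pvBLoop.eq_def]; simp [pvSpecFn]
  · by_cases hc : PySem.Chars.isalpha c = true
    · rw [pvBLoop.eq_def]; simp only [if_pos hc]
      have hsplit : (c :: rest).takeWhile PySem.Chars.isalpha
          ++ (c :: rest).dropWhile PySem.Chars.isalpha = c :: rest :=
        List.takeWhile_append_dropWhile
      have hlen : ((c :: rest).dropWhile PySem.Chars.isalpha).length < (c :: rest).length := by
        rw [List.dropWhile_cons_of_pos hc]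
        exact Nat.lt_succ_of_le (List.length_dropWhile_le _ _)
      rw [pvB_eq_spec ((c :: rest).dropWhile PySem.Chars.isalpha)]
      rw [pvRun_emit _ _ (fun x hx => List.mem_takeWhile_imp hx) ?_, hsplit]
      cases hdw : (c :: rest).dropWhile PySem.Chars.isalpha with
      | nil => simp [pvNextAlpha]
      | cons d ds =>
        have hd : PySem.Chars.isalpha d = false := by
          have := List.head?_dropWhile_not PySem.Chars.isalpha (c :: rest)
          rw [hdw] at this; simpa using this
        simp [pvNextAlpha, hd]
    · rw [pvBLoop.eq_def]; simp only [if_neg hc]; rw [pvB_eq_spec rest]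
      have hc2 : ¬ ('a' ≤ c ∧ c ≤ 'z') := fun h => hc (pv_islower_imp c h)
      simp [pvSpecFn, hc2]
termination_by l.length
decreasing_by
  · exact hlen
  · simp

-- ===== VERDICT (by name: the statement is the Claim_ definition above) =====
theorem direct_numeric_spec : Claim_equal_direct_numeric := by
  intro pt _
  unfold Spec_direct_numeric direct_numeric direct_numeric_alt
  rw [pvB_eq_spec]
  have h := pvA_loop pt.toList 0 []
  simp only [Nat.cast_zero, List.drop_zero, List.nil_append] at h
  simp only [h]
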